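-- pv_equiv track=rewrite | github.com/DITreneris/ARPGuard | src/core/pattern_recognition.py | is_sequential_ip_range
-- ===== SOURCE A (Python) =====
-- from typing import Dict, List, Set, Tuple, Optional, Any
--
-- def is_sequential_ip_range(ips: List[str]) -> bool:
--     """Check if a list of IPs represents a sequential range."""
--     if len(ips) < 3:
--         return False
--
--     # Parse IPs and sort by last octet
--     octets = []
--     for ip in ips:
--         try:
--             parts = [int(p) for p in ip.split('.')]
--             if len(parts) == 4:
--                 octets.append(parts)
--         except:
--             return False
--
--     # Sort by last octet
--     octets.sort(key=lambda x: x[3])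
--
--     # Check if first 3 octets are the same for all IPs
--     base_network = octets[0][:3]
--     if not all(ip[:3] == base_network for ip in octets):
--         return False
--
--     # Check for sequential last octets
--     for i in range(len(octets) - 1):
--         if octets[i+1][3] - octets[i][3] != 1:
--             return False
--
--     return True
-- ===== SOURCE B (Python) =====
-- def is_sequential_ip_range(ips):
--     """Check if a list of IPs represents a sequential range — one pass, no sort:
--     same /24 base, distinct last octets, max-min == count-1."""
--     if len(ips) < 3:
--         return False
--     base = None
--     seen = set()
--     lo = 0
--     hi = 0
--     for ip in ips:
--         try:
--             parts = [int(p) for p in ip.split('.')]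
--         except ValueError:
--             return False
--         if len(parts) != 4:
--             continue
--         last = parts[3]
--         if base is None:
--             base = parts[:3]
--             lo = last
--             hi = last
--         else:
--             if parts[:3] != base:
--                 return False
--             if last in seen:
--                 return False
--             if last < lo:
--                 lo = last
--             if last > hi:
--                 hi = last
--         seen.add(last)
--     return len(seen) > 0 and hi - lo == len(seen) - 1
-- ===== Notes on version B (the rewrite author's own statement) =====
-- stated objective: alternative
-- what changed: A parses all IPs, sorts the octet lists by last octet and then scans adjacent pairs for difference 1; B makes a single sort-free pass tracking the common first-three-octets base, a set of seen last octets, and their running min/max, and decides sequentiality by max-min == count-1 (timing is parity: input parsing dominates both).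
import Mathlib
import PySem

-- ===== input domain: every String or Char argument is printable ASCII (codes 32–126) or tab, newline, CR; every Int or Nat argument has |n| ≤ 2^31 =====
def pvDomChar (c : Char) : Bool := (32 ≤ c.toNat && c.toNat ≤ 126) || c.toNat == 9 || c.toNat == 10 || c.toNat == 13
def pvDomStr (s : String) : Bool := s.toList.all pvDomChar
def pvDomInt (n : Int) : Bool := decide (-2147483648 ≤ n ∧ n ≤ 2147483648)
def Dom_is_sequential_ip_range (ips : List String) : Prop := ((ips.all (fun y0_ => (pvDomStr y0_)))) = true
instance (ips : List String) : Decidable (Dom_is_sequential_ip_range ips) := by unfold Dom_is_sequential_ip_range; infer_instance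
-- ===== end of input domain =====

-- B replaces A's sort-then-scan with a single sort-free pass (same first-three-octets base,
-- distinct last octets tracked in a set, max-min == count-1): objective 'alternative'.

-- ===== PORT A =====
-- [int(p) for p in ip.split('.')] built element by element; none = the ValueError
-- caught by A's bare except
def pvIntsA : List String → Option (List Int)
  | [] => some []
  | p :: ps =>
    match PySem.Int.ofStr? p with
    | none => none
    | some v => (pvIntsA ps).map (v :: ·)

def pvParseA (ip : String) : Option (List Int) :=
  match PySem.Str.split? ip "." with
  | none => none
  | some ps => pvIntsA ps

-- A's first loop: build octets (keeping only 4-part entries); early `return False` = none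
def pvCollectA : List String → Option (List (List Int))
  | [] => some []
  | ip :: rest =>
    match pvParseA ip with
    | none => none
    | some parts =>
      if parts.length = 4 then (pvCollectA rest).map (parts :: ·)
      else pvCollectA rest

-- A's last loop over i in range(len-1): octets[i+1][3] - octets[i][3] != 1 → False;
-- every element has length 4 here, so x[3] is x.getD 3 0
def pvSeqA : List (List Int) → Bool
  | x :: y :: t => decide (y.getD 3 0 - x.getD 3 0 = 1) && pvSeqA (y :: t)
  | _ => true

def is_sequential_ip_range (ips : List String) : Bool :=
  if ips.length < 3 then false
  else
    match pvCollectA ips with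
    | none => false
    | some octets =>
      -- octets.sort(key=lambda x: x[3]); x[3] is x.getD 3 0 (all elements have length 4)
      let s := PySem.List.sorted octets (fun x => x.getD 3 0)
      match s with
      | [] => false  -- Python raises IndexError on octets[0] here; excluded by Pre_
      | b0 :: _ =>
        let base := b0.take 3  -- octets[0][:3] (nonnegative slice = take)
        if s.all (fun x => x.take 3 == base) then pvSeqA s else false

-- ===== PORT B =====
def pvIntsB : List String → Option (List Int)
  | [] => some []
  | p :: ps =>
    match PySem.Int.ofStr? p with
    | none => none
    | some v => (pvIntsB ps).map (v :: ·)

def pvParseB (ip : String) : Option (List Int) :=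
  match PySem.Str.split? ip "." with
  | none => none
  | some ps => pvIntsB ps

-- B's single loop; state = (base, seen, lo, hi); early `return False` = false
def pvLoopB : List String → Option (List Int) → PySem.Set Int → Int → Int → Bool
  | [], _, seen, lo, hi =>
      decide (0 < PySem.Set.len seen) && decide (hi - lo = PySem.Set.len seen - 1)
  | ip :: rest, base, seen, lo, hi =>
    match pvParseB ip with
    | none => false
    | some parts =>
      if parts.length ≠ 4 then pvLoopB rest base seen lo hi
      else
        let last := parts.getD 3 0
        match base with
        | none => pvLoopB rest (some (parts.take 3)) (PySem.Set.add seen last) last last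
        | some b =>
          if parts.take 3 ≠ b then false
          else if PySem.Set.contains seen last then false
          else pvLoopB rest (some b) (PySem.Set.add seen last)
                 (if last < lo then last else lo) (if hi < last then last else hi)

def is_sequential_ip_range_alt (ips : List String) : Bool :=
  if ips.length < 3 then false
  else pvLoopB ips none PySem.Set.empty 0 0

-- ===== PRECONDITION & SPEC =====
-- every part of ip.split('.') parses as a Python int
def pvPreOk (ip : String) : Bool :=
  ((PySem.Str.split? ip ".").getD []).all (fun p => (PySem.Int.ofStr? p).isSome)
-- ip.split('.') has exactly 4 parts
def pvPreIs4 (ip : String) : Bool :=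
  ((PySem.Str.split? ip ".").getD []).length == 4

-- Pre_ excludes exactly the inputs where A raises IndexError (octets[0] on an empty
-- octets list): 3+ ips that all parse as ints, but none with exactly 4 dot-parts.
def Pre_is_sequential_ip_range (ips : List String) : Prop :=
  ¬ (3 ≤ ips.length ∧ ips.all pvPreOk = true ∧ ips.all (fun ip => !pvPreIs4 ip) = true)
instance (ips : List String) : Decidable (Pre_is_sequential_ip_range ips) := by
  unfold Pre_is_sequential_ip_range; infer_instance

def pvWitness_is_sequential_ip_range : List String := ["1.2.3.4", "1.2.3.6", "1.2.3.5"]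

def Spec_is_sequential_ip_range (ips : List String) (out : Bool) : Prop :=
  out = is_sequential_ip_range_alt ips
instance (ips : List String) (out : Bool) : Decidable (Spec_is_sequential_ip_range ips out) := by
  unfold Spec_is_sequential_ip_range; infer_instance

-- ===== CLAIM (what is proved, stated in full; the proofs are below) =====
def Claim_equal_is_sequential_ip_range : Prop :=
  ∀ (ips : List String), Dom_is_sequential_ip_range ips →
    Pre_is_sequential_ip_range ips →
    Spec_is_sequential_ip_range ips (is_sequential_ip_range ips)

-- ===== LEMMAS AND PROOFS =====

-- last octets of a parsed list
def pvLasts (os : List (List Int)) : List Int := os.map (fun o => o.getD 3 0)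

-- B's loop on the already-parsed 4-part octets (proof-side abstraction of pvLoopB)
def pvLoopP : List (List Int) → Option (List Int) → PySem.Set Int → Int → Int → Bool
  | [], _, seen, lo, hi =>
      decide (0 < PySem.Set.len seen) && decide (hi - lo = PySem.Set.len seen - 1)
  | o :: rest, base, seen, lo, hi =>
    let last := o.getD 3 0
    match base with
    | none => pvLoopP rest (some (o.take 3)) (PySem.Set.add seen last) last last
    | some b =>
      if o.take 3 ≠ b then false
      else if PySem.Set.contains seen last then false
      else pvLoopP rest (some b) (PySem.Set.add seen last)
             (if last < lo then last else lo) (if hi < last then last else hi)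

-- the pure "consecutive differences are all 1" check on the key list
def pvDiffOne : List Int → Bool
  | a :: b :: t => decide (b - a = 1) && pvDiffOne (b :: t)
  | _ => true

theorem pv_bool_eq_of_iff (a b : Bool) (h : a = true ↔ b = true) : a = b := by
  cases a <;> cases b <;> simp_all

theorem pvIntsB_eq_intsA (ps : List String) : pvIntsB ps = pvIntsA ps := by
  induction ps with
  | nil => rfl
  | cons p ps ih => simp only [pvIntsA, pvIntsB, ih]

theorem pvParseB_eq_parseA (ip : String) : pvParseB ip = pvParseA ip := by
  simp only [pvParseA, pvParseB, pvIntsB_eq_intsA]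

theorem pvIntsA_some (ps : List String) :
    ∀ parts, pvIntsA ps = some parts →
      parts.length = ps.length ∧ ∀ p ∈ ps, (PySem.Int.ofStr? p).isSome = true := by
  induction ps with
  | nil => intro parts h; simp [pvIntsA] at h; subst h; simp
  | cons p ps ih =>
    intro parts h
    rw [pvIntsA] at h
    cases hv : PySem.Int.ofStr? p with
    | none => rw [hv] at h; simp at h
    | some v =>
      rw [hv] at h
      cases hr : pvIntsA ps with
      | none => rw [hr] at h; simp at h
      | some vs =>
        rw [hr] at h; simp at h; subst h
        rcases ih vs hr with ⟨h1, h2⟩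
        refine ⟨by simp [h1], ?_⟩
        intro q hq
        rcases List.mem_cons.mp hq with rfl | hq
        · simp [hv]
        · exact h2 q hq

theorem pvCollect_some_nil_raises (ips : List String) :
    pvCollectA ips = some [] →
      ips.all pvPreOk = true ∧ ips.all (fun ip => !pvPreIs4 ip) = true := by
  induction ips with
  | nil => intro _; exact ⟨rfl, rfl⟩
  | cons ip rest ih =>
    intro h
    rw [pvCollectA] at h
    cases hp : pvParseA ip with
    | none => rw [hp] at h; simp at h
    | some parts =>
      rw [hp] at h
      dsimp only [] at h
      by_cases h4 : parts.length = 4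
      · rw [if_pos h4] at h
        cases hc : pvCollectA rest with
        | none => rw [hc] at h; simp at h
        | some os => rw [hc] at h; simp at h
      · rw [if_neg h4] at h
        rcases ih h with ⟨h1, h2⟩
        rw [pvParseA] at hp
        cases hsp : PySem.Str.split? ip "." with
        | none => rw [hsp] at hp; cases hp
        | some ps =>
          rw [hsp] at hp
          rcases pvIntsA_some ps parts hp with ⟨hl, hall⟩
          constructor
          · rw [List.all_cons, h1, Bool.and_true]
            simp only [pvPreOk, hsp, Option.getD_some]
            exact List.all_eq_true.mpr hall
          · rw [List.all_cons, h2, Bool.and_true]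
            simp only [pvPreIs4, hsp, Option.getD_some]
            simp [← hl, h4]

theorem pvCollect_none_loopB (ips : List String) :
    ∀ base seen lo hi, pvCollectA ips = none →
      pvLoopB ips base seen lo hi = false := by
  induction ips with
  | nil => intro _ _ _ _ h; simp [pvCollectA] at h
  | cons ip rest ih =>
    intro base seen lo hi h
    rw [pvCollectA] at h
    simp only [pvLoopB, pvParseB_eq_parseA]
    cases hp : pvParseA ip with
    | none => rfl
    | some parts =>
      rw [hp] at h
      dsimp only [] at h
      by_cases h4 : parts.length = 4
      · simp only [if_pos h4] at h
        have hc : pvCollectA rest = none := by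
          cases hcc : pvCollectA rest with
          | none => rfl
          | some os => rw [hcc] at h; simp at h
        simp only [if_neg (not_not_intro h4)]
        cases base with
        | none => exact ih _ _ _ _ hc
        | some b =>
          show (if _ then _ else _) = false
          by_cases hb : parts.take 3 = b
          · rw [if_neg (not_not_intro hb)]
            by_cases hs : PySem.Set.contains seen (parts.getD 3 0) = true
            · rw [if_pos hs]
            · rw [if_neg hs]; exact ih _ _ _ _ hc
          · rw [if_pos hb]
      · simp only [if_neg h4] at h
        simp only [if_pos h4]
        exact ih _ _ _ _ h

theorem pvCollect_some_loopB (ips : List String) :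
    ∀ os base seen lo hi, pvCollectA ips = some os →
      pvLoopB ips base seen lo hi = pvLoopP os base seen lo hi := by
  induction ips with
  | nil =>
    intro os _ _ _ _ h
    simp [pvCollectA] at h; subst h; rfl
  | cons ip rest ih =>
    intro os base seen lo hi h
    rw [pvCollectA] at h
    simp only [pvLoopB, pvParseB_eq_parseA]
    cases hp : pvParseA ip with
    | none => rw [hp] at h; simp at h
    | some parts =>
      rw [hp] at h
      dsimp only [] at h
      by_cases h4 : parts.length = 4
      · simp only [if_pos h4] at h
        cases hc : pvCollectA rest with
        | none => rw [hc] at h; simp at h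
        | some os' =>
          rw [hc] at h; simp at h; subst h
          simp only [if_neg (not_not_intro h4), pvLoopP]
          cases base with
          | none => exact ih _ _ _ _ _ hc
          | some b =>
            show (if _ then _ else _) = (if _ then _ else _)
            by_cases hb : parts.take 3 = b
            · rw [if_neg (not_not_intro hb), if_neg (not_not_intro hb)]
              by_cases hs : PySem.Set.contains seen (parts.getD 3 0) = true
              · rw [if_pos hs, if_pos hs]
              · rw [if_neg hs, if_neg hs]; exact ih _ _ _ _ _ hc
            · rw [if_pos hb, if_pos hb]
      · simp only [if_neg h4] at h
        simp only [if_pos h4]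
        exact ih _ _ _ _ _ h

theorem pvLoopP_some_iff (os : List (List Int)) :
    ∀ (b : List Int) (seen : PySem.Set Int) (lo hi : Int),
      (pvLoopP os (some b) seen lo hi = true ↔
        (∀ o ∈ os, o.take 3 = b) ∧
        (pvLasts os).Nodup ∧
        (∀ l ∈ pvLasts os, PySem.Set.contains seen l = false) ∧
        ((pvLasts os).foldl max hi - (pvLasts os).foldl min lo =
          PySem.Set.len seen + (pvLasts os).length - 1) ∧
        (0 < PySem.Set.len seen + (pvLasts os).length)) := by
  induction os with
  | nil =>
    intro b seen lo hi
    simp only [pvLoopP, pvLasts, Bool.and_eq_true, decide_eq_true_eq, List.map_nil,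
      List.foldl_nil, List.length_nil, Nat.cast_zero, add_zero]
    constructor
    · rintro ⟨h1, h2⟩; exact ⟨by simp, by simp, by simp, h2, by exact_mod_cast h1⟩
    · rintro ⟨-, -, -, h2, h1⟩; exact ⟨by exact_mod_cast h1, h2⟩
  | cons o rest ih =>
    intro b seen lo hi
    show (if _ then _ else _) = true ↔ _
    by_cases hb : o.take 3 = b
    · rw [if_neg (not_not_intro hb)]
      by_cases hs : PySem.Set.contains seen (o.getD 3 0) = true
      · rw [if_pos hs]
        constructor
        · intro h; cases h
        · rintro ⟨_, _, hfresh, _⟩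
          have := hfresh (o.getD 3 0) (by simp [pvLasts])
          rw [hs] at this; cases this
      · rw [if_neg hs]
        rw [ih]
        have hsf : PySem.Set.contains seen (o.getD 3 0) = false :=
          Bool.eq_false_iff.mpr hs
        have hlen : PySem.Set.len (PySem.Set.add seen (o.getD 3 0)) =
            PySem.Set.len seen + 1 := by
          simp only [PySem.Set.add, hs]
          simp [PySem.Set.len]
        have hcont : ∀ l : Int, PySem.Set.contains (PySem.Set.add seen (o.getD 3 0)) l =
            (PySem.Set.contains seen l || decide (l = o.getD 3 0)) := by
          intro l
          simp only [PySem.Set.add, if_neg hs]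
          simp [PySem.Set.contains]
        constructor
        · rintro ⟨hball, hnd, hfresh, harith, hpos⟩
          refine ⟨?_, ?_, ?_, ?_, ?_⟩
          · intro x hx
            rcases List.mem_cons.mp hx with rfl | hx
            · exact hb
            · exact hball x hx
          · refine List.nodup_cons.mpr ⟨?_, hnd⟩
            intro hmem
            have := hfresh _ hmem
            rw [hcont] at this
            rcases Bool.or_eq_false_iff.mp this with ⟨-, h2⟩
            simp at h2
          · intro l hl
            rcases List.mem_cons.mp hl with rfl | hl
            · exact hsf
            · have := hfresh _ hl
              rw [hcont] at this
              exact (Bool.or_eq_false_iff.mp this).1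
          · show (pvLasts (o :: rest)).foldl max hi - (pvLasts (o :: rest)).foldl min lo = _
            have e1 : pvLasts (o :: rest) = o.getD 3 0 :: pvLasts rest := rfl
            rw [e1]
            simp only [List.foldl_cons, List.length_cons]
            rw [hlen] at harith
            have emax : max hi (o.getD 3 0) = if hi < o.getD 3 0 then o.getD 3 0 else hi := by
              rcases le_or_gt (o.getD 3 0) hi with h | h
              · rw [if_neg (by omega), max_eq_left h]
              · rw [if_pos h, max_eq_right (le_of_lt h)]
            have emin : min lo (o.getD 3 0) = if o.getD 3 0 < lo then o.getD 3 0 else lo := by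
              rcases le_or_gt lo (o.getD 3 0) with h | h
              · rw [if_neg (by omega), min_eq_left h]
              · rw [if_pos h, min_eq_right (le_of_lt h)]
            rw [emax, emin]
            push_cast [List.length_cons]
            omega
          · rw [hlen] at hpos
            show 0 < PySem.Set.len seen + ((pvLasts (o :: rest)).length : Int)
            have e1 : pvLasts (o :: rest) = o.getD 3 0 :: pvLasts rest := rfl
            rw [e1]
            push_cast [List.length_cons]
            omega
        · rintro ⟨hball, hnd, hfresh, harith, hpos⟩
          have e1 : pvLasts (o :: rest) = o.getD 3 0 :: pvLasts rest := rfl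
          rw [e1] at hnd hfresh harith hpos
          have hnotin : o.getD 3 0 ∉ pvLasts rest := (List.nodup_cons.mp hnd).1
          refine ⟨fun x hx => hball x (List.mem_cons_of_mem _ hx), (List.nodup_cons.mp hnd).2, ?_, ?_, ?_⟩
          · intro l hl
            rw [hcont]
            have h1 := hfresh l (List.mem_cons_of_mem _ hl)
            have h2 : l ≠ o.getD 3 0 := fun e => hnotin (e ▸ hl)
            simp [PySem.Set.contains] at h1
            simp [PySem.Set.contains, h1]
            exact h2
          · rw [hlen]
            simp only [List.foldl_cons, List.length_cons] at harith
            have emax : max hi (o.getD 3 0) = if hi < o.getD 3 0 then o.getD 3 0 else hi := by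
              rcases le_or_gt (o.getD 3 0) hi with h | h
              · rw [if_neg (by omega), max_eq_left h]
              · rw [if_pos h, max_eq_right (le_of_lt h)]
            have emin : min lo (o.getD 3 0) = if o.getD 3 0 < lo then o.getD 3 0 else lo := by
              rcases le_or_gt lo (o.getD 3 0) with h | h
              · rw [if_neg (by omega), min_eq_left h]
              · rw [if_pos h, min_eq_right (le_of_lt h)]
            rw [emax, emin] at harith
            push_cast [List.length_cons] at harith ⊢
            omega
          · rw [hlen]
            push_cast [List.length_cons] at hpos
            omega
    · rw [if_pos hb]
      constructor
      · intro h; cases h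
      · rintro ⟨hball, _⟩
        exact absurd (hball o (List.mem_cons_self)) hb

theorem pvFoldlMin_head (k : Int) (t : List Int) (h : (k :: t).Pairwise (· ≤ ·)) :
    t.foldl min k = k := by
  have h1 := (PySem.List.foldl_min_le t k).1
  rcases PySem.List.foldl_min_mem t k with he | hm
  · exact he
  · have := (List.pairwise_cons.mp h).1 _ hm
    omega

theorem pvFoldlMax_perm (x y : Int) (t u : List Int) (h : (x :: t).Perm (y :: u)) :
    t.foldl max x = u.foldl max y := by
  have hx := PySem.List.le_foldl_max t x
  have hy := PySem.List.le_foldl_max u y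
  have hmx : t.foldl max x ∈ x :: t := by
    rcases PySem.List.foldl_max_mem t x with he | hm
    · rw [he]; exact List.mem_cons_self
    · exact List.mem_cons_of_mem _ hm
  have hmy : u.foldl max y ∈ y :: u := by
    rcases PySem.List.foldl_max_mem u y with he | hm
    · rw [he]; exact List.mem_cons_self
    · exact List.mem_cons_of_mem _ hm
  have h1 : t.foldl max x ≤ u.foldl max y := by
    rcases List.mem_cons.mp (h.mem_iff.mp hmx) with he | hm
    · rw [he]; exact hy.1
    · exact hy.2 _ hm
  have h2 : u.foldl max y ≤ t.foldl max x := by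
    rcases List.mem_cons.mp (h.symm.mem_iff.mp hmy) with he | hm
    · rw [he]; exact hx.1
    · exact hx.2 _ hm
  omega

theorem pvFoldlMin_perm (x y : Int) (t u : List Int) (h : (x :: t).Perm (y :: u)) :
    t.foldl min x = u.foldl min y := by
  have hx := PySem.List.foldl_min_le t x
  have hy := PySem.List.foldl_min_le u y
  have hmx : t.foldl min x ∈ x :: t := by
    rcases PySem.List.foldl_min_mem t x with he | hm
    · rw [he]; exact List.mem_cons_self
    · exact List.mem_cons_of_mem _ hm
  have hmy : u.foldl min y ∈ y :: u := by
    rcases PySem.List.foldl_min_mem u y with he | hm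
    · rw [he]; exact List.mem_cons_self
    · exact List.mem_cons_of_mem _ hm
  have h1 : u.foldl min y ≤ t.foldl min x := by
    rcases List.mem_cons.mp (h.mem_iff.mp hmx) with he | hm
    · rw [he] at *; omega
    · exact le_of_eq_of_le rfl (hy.2 _ hm)
  have h2 : t.foldl min x ≤ u.foldl min y := by
    rcases List.mem_cons.mp (h.symm.mem_iff.mp hmy) with he | hm
    · rw [he] at *; omega
    · exact hx.2 _ hm
  omega

theorem pvClimb (t : List Int) : ∀ k : Int, (k :: t).Pairwise (· ≤ ·) →
    (k :: t).Nodup → (t.length : Int) ≤ t.foldl max k - k := by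
  induction t with
  | nil => intro k _ _; simp
  | cons k1 u ih =>
    intro k hp hn
    have hk : k ≤ k1 := (List.pairwise_cons.mp hp).1 _ List.mem_cons_self
    have hne : k ≠ k1 := by
      intro e; exact (List.nodup_cons.mp hn).1 (e ▸ List.mem_cons_self)
    have hp' : (k1 :: u).Pairwise (· ≤ ·) := (List.pairwise_cons.mp hp).2
    have hn' : (k1 :: u).Nodup := (List.nodup_cons.mp hn).2
    have := ih k1 hp' hn'
    have e : (k1 :: u).foldl max k = u.foldl max (max k k1) := rfl
    rw [List.length_cons]
    rw [show (k1 :: u).foldl max k = u.foldl max k1 by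
      rw [e, max_eq_right hk]]
    push_cast
    omega

theorem pvDiffOne_iff (t : List Int) : ∀ k : Int, (k :: t).Pairwise (· ≤ ·) →
    (pvDiffOne (k :: t) = true ↔ (k :: t).Nodup ∧ t.foldl max k - k = t.length) := by
  induction t with
  | nil => intro k _; simp [pvDiffOne]
  | cons k1 u ih =>
    intro k hp
    have hk : k ≤ k1 := (List.pairwise_cons.mp hp).1 _ List.mem_cons_self
    have hp' : (k1 :: u).Pairwise (· ≤ ·) := (List.pairwise_cons.mp hp).2
    have efold : (k1 :: u).foldl max k = u.foldl max k1 := by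
      show u.foldl max (max k k1) = u.foldl max k1
      rw [max_eq_right hk]
    have ih' := ih k1 hp'
    constructor
    · intro h
      rw [show pvDiffOne (k :: k1 :: u) = (decide (k1 - k = 1) && pvDiffOne (k1 :: u)) from rfl] at h
      rcases (Bool.and_eq_true _ _).mp h with ⟨h1, h2⟩
      have hd : k1 - k = 1 := of_decide_eq_true h1
      rcases ih'.mp h2 with ⟨hnd', harith'⟩
      constructor
      · refine List.nodup_cons.mpr ⟨?_, hnd'⟩
        intro hmem
        rcases List.mem_cons.mp hmem with he | hm
        · omega
        · have := (List.pairwise_cons.mp hp').1 _ hm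
          omega
      · rw [efold, List.length_cons]
        push_cast
        omega
    · rintro ⟨hnd, harith⟩
      have hnd' : (k1 :: u).Nodup := (List.nodup_cons.mp hnd).2
      have hne : k ≠ k1 := by
        intro e; exact (List.nodup_cons.mp hnd).1 (e ▸ List.mem_cons_self)
      rw [efold, List.length_cons] at harith
      have hclimb := pvClimb u k1 hp' hnd'
      have hd : k1 - k = 1 := by push_cast at harith; omega
      have h2 : pvDiffOne (k1 :: u) = true := by
        apply ih'.mpr
        refine ⟨hnd', ?_⟩
        have hub := (PySem.List.le_foldl_max u k1).1
        push_cast at harith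
        omega
      rw [show pvDiffOne (k :: k1 :: u) = (decide (k1 - k = 1) && pvDiffOne (k1 :: u)) from rfl]
      rw [h2, decide_eq_true hd]
      rfl

theorem pvSeqA_eq_diffOne (s : List (List Int)) :
    pvSeqA s = pvDiffOne (s.map (fun o => o.getD 3 0)) := by
  match s with
  | [] => rfl
  | [x] => rfl
  | x :: y :: t =>
    rw [show pvSeqA (x :: y :: t) = (decide (y.getD 3 0 - x.getD 3 0 = 1) && pvSeqA (y :: t)) from rfl]
    rw [pvSeqA_eq_diffOne (y :: t)]
    rfl


theorem pv_main (ips : List String)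
    (hpre : Pre_is_sequential_ip_range ips) :
    is_sequential_ip_range ips = is_sequential_ip_range_alt ips := by
  unfold is_sequential_ip_range is_sequential_ip_range_alt
  by_cases hlen : ips.length < 3
  · rw [if_pos hlen, if_pos hlen]
  · rw [if_neg hlen, if_neg hlen]
    cases hc : pvCollectA ips with
    | none =>
      rw [pvCollect_none_loopB ips _ _ _ _ hc]
    | some os =>
      rw [pvCollect_some_loopB ips os _ _ _ _ hc]
      cases os with
      | nil =>
        exact absurd ⟨by omega, (pvCollect_some_nil_raises ips hc).1,
          (pvCollect_some_nil_raises ips hc).2⟩ hpre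
      | cons o rest =>
        dsimp only []
        have hperm := PySem.List.sorted_perm (o :: rest) (fun x => x.getD 3 0) false
        have hpw := PySem.List.sorted_map_key_pairwise (o :: rest) (fun x => x.getD 3 0)
        cases hs : PySem.List.sorted (o :: rest) (fun x => x.getD 3 0) with
        | nil =>
          exact absurd ((PySem.List.sorted_eq_nil_iff _ _ _).mp hs) (by simp)
        | cons s0 st =>
          rw [hs] at hperm hpw
          dsimp only []
          set l0 : Int := o.getD 3 0 with hl0
          -- the RHS state after B consumes the first octet
          have hseen0 : PySem.Set.add PySem.Set.empty l0 = [l0] := rfl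
          have hpermL : ((s0 :: st).map (fun x => x.getD 3 0)).Perm (pvLasts (o :: rest)) :=
            hperm.map _
          have hs0mem : s0 ∈ o :: rest := hperm.subset List.mem_cons_self
          apply pv_bool_eq_of_iff
          -- left side as a conjunction
          have hleft : ((if (s0 :: st).all (fun x => x.take 3 == s0.take 3) then
              pvSeqA (s0 :: st) else false) = true) ↔
              ((∀ x ∈ o :: rest, x.take 3 = s0.take 3) ∧ pvSeqA (s0 :: st) = true) := by
            by_cases hcb : (s0 :: st).all (fun x => x.take 3 == s0.take 3) = true
            · rw [if_pos hcb]
              have : ∀ x ∈ o :: rest, x.take 3 = s0.take 3 := by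
                intro x hx
                have := List.all_eq_true.mp hcb x (hperm.mem_iff.mpr hx)
                exact beq_iff_eq.mp this
              constructor
              · intro h; exact ⟨this, h⟩
              · rintro ⟨-, h⟩; exact h
            · rw [if_neg hcb]
              constructor
              · intro h; cases h
              · rintro ⟨hall, -⟩
                refine absurd (List.all_eq_true.mpr ?_) hcb
                intro x hx
                exact beq_iff_eq.mpr (hall x (hperm.mem_iff.mp hx))
          rw [hleft]
          -- right side via the loop invariant
          have hstep : pvLoopP (o :: rest) none PySem.Set.empty 0 0 =
              pvLoopP rest (some (o.take 3)) (PySem.Set.add PySem.Set.empty l0) l0 l0 := rfl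
          rw [hstep, pvLoopP_some_iff]
          have hcont1 : ∀ l : Int, (PySem.Set.contains [l0] l = false) ↔ ¬ l = l0 := by
            intro l; simp [PySem.Set.contains]
          -- the seq check via pvDiffOne on the sorted keys
          have hkpw : ((fun x => x.getD 3 0) s0 :: st.map (fun x => x.getD 3 0)).Pairwise (· ≤ ·) := by
            rw [List.map_cons] at hpw; exact hpw
          have hseq : pvSeqA (s0 :: st) = true ↔
              ((s0.getD 3 0 :: st.map (fun x => x.getD 3 0)).Nodup ∧
               (st.map (fun x => x.getD 3 0)).foldl max (s0.getD 3 0) - s0.getD 3 0 =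
                 ((st.map (fun x => x.getD 3 0)).length : Int)) := by
            rw [pvSeqA_eq_diffOne, List.map_cons]
            exact pvDiffOne_iff _ _ hkpw
          -- transfer the three data through the permutation
          have hpermK : (s0.getD 3 0 :: st.map (fun x => x.getD 3 0)).Perm
              (l0 :: pvLasts rest) := by
            have := hpermL
            rw [List.map_cons] at this
            simpa [pvLasts, hl0] using this
          have hnodupT : (s0.getD 3 0 :: st.map (fun x => x.getD 3 0)).Nodup ↔
              (l0 :: pvLasts rest).Nodup := hpermK.nodup_iff
          have hmaxT : (st.map (fun x => x.getD 3 0)).foldl max (s0.getD 3 0) =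
              (pvLasts rest).foldl max l0 := pvFoldlMax_perm _ _ _ _ hpermK
          have hminT : (st.map (fun x => x.getD 3 0)).foldl min (s0.getD 3 0) =
              (pvLasts rest).foldl min l0 := pvFoldlMin_perm _ _ _ _ hpermK
          have hminHead : (st.map (fun x => x.getD 3 0)).foldl min (s0.getD 3 0) =
              s0.getD 3 0 := pvFoldlMin_head _ _ hkpw
          have hlenT : st.length = rest.length := by
            have := hperm.length_eq; simpa using this
          constructor
          · rintro ⟨hall, hseqt⟩
            rcases hseq.mp hseqt with ⟨hnd, harith⟩
            have hndL := hnodupT.mp hnd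
            have hbase : ∀ x ∈ o :: rest, x.take 3 = o.take 3 := by
              intro x hx
              rw [hall x hx, (hall o List.mem_cons_self).symm]
            refine ⟨?_, (List.nodup_cons.mp hndL).2, ?_, ?_, ?_⟩
            · intro x hx
              exact hbase x (List.mem_cons_of_mem _ hx)
            · intro l hl
              rw [hseen0, hcont1]
              intro e
              exact (List.nodup_cons.mp hndL).1 (e ▸ hl)
            · rw [hseen0]
              show (pvLasts rest).foldl max l0 - (pvLasts rest).foldl min l0 =
                (1 : Int) + ((pvLasts rest).length : Int) - 1
              rw [← hmaxT, ← hminT, hminHead, harith]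
              simp [pvLasts, hlenT]
            · rw [hseen0]
              show (0:Int) < 1 + ((pvLasts rest).length : Int)
              positivity
          · rintro ⟨hall, hnd, hfresh, harith, -⟩
            have hndL : (l0 :: pvLasts rest).Nodup := by
              refine List.nodup_cons.mpr ⟨?_, hnd⟩
              intro hmem
              have := hfresh _ hmem
              rw [hseen0, hcont1] at this
              exact this rfl
            have hallfull : ∀ x ∈ o :: rest, x.take 3 = o.take 3 := by
              intro x hx
              rcases List.mem_cons.mp hx with rfl | hx
              · rfl
              · exact hall x hx
            have hbase' : ∀ x ∈ o :: rest, x.take 3 = s0.take 3 := by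
              intro x hx
              rw [hallfull x hx, ← hallfull s0 hs0mem]
            refine ⟨hbase', hseq.mpr ⟨hnodupT.mpr hndL, ?_⟩⟩
            rw [hseen0] at harith
            rw [hmaxT, ← hminHead, hminT, harith]
            simp [PySem.Set.len, pvLasts, hlenT]

-- ===== VERDICT (by name: the statement is the Claim_ definition above) =====
theorem is_sequential_ip_range_spec : Claim_equal_is_sequential_ip_range := by
  intro ips _ hpre
  exact pv_main ips hpre
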